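-- pv_equiv track=rewrite | github.com/cltl/micro-portraits | microportraits/microportraits.py | is_passive
-- ===== SOURCE A (Python) =====
-- def is_passive(deprels):
--
--     rels = []
--     for drel in deprels:
--         rels.append(drel[1])
--     if 'hd/su' in rels and 'hd/obj1' in rels:
--         return True
--     else:
--         return False
-- ===== SOURCE B (Python) =====
-- def is_passive(deprels):
--     has_su = False
--     has_obj = False
--     for drel in deprels:
--         rel = drel[1]
--         if rel == 'hd/su':
--             has_su = True
--         if rel == 'hd/obj1':
--             has_obj = True
--     return has_su and has_obj
-- ===== Notes on version B (the rewrite author's own statement) =====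
-- stated objective: simpler
-- what changed: Single pass over deprels maintaining two boolean flags instead of building an intermediate list of relation labels and scanning it twice with membership tests.
import Mathlib
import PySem

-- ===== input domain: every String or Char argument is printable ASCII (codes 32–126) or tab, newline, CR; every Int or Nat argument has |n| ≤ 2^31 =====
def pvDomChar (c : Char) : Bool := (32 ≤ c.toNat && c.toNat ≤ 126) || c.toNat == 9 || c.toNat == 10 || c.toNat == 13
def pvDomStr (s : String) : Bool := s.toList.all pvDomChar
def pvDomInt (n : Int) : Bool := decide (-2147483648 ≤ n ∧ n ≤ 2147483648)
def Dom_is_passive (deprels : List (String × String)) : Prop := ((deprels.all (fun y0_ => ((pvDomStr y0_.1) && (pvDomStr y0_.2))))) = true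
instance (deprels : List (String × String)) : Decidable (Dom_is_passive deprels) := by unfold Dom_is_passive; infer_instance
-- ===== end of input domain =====

-- B replaces A's intermediate label list and its two membership scans by one pass with two boolean flags (objective: simpler).

-- ===== PORT A =====
def is_passive (deprels : List (String × String)) : Bool :=
  let rels := deprels.foldl (fun acc drel => acc ++ [drel.2]) []
  if rels.contains "hd/su" ∧ rels.contains "hd/obj1" then true else false

-- ===== PORT B =====
def is_passive_alt (deprels : List (String × String)) : Bool :=
  let p := deprels.foldl
    (fun (st : Bool × Bool) drel =>
      let rel := drel.2
      ((if rel == "hd/su" then true else st.1), (if rel == "hd/obj1" then true else st.2)))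
    (false, false)
  p.1 && p.2

-- ===== PRECONDITION & SPEC =====
def Spec_is_passive (deprels : List (String × String)) (out : Bool) : Prop := out = is_passive_alt deprels
instance (deprels : List (String × String)) (out : Bool) : Decidable (Spec_is_passive deprels out) := by unfold Spec_is_passive; infer_instance

-- ===== CLAIM (what is proved, stated in full; the proofs are below) =====
def Claim_equal_is_passive : Prop := ∀ (deprels : List (String × String)), Dom_is_passive deprels → Spec_is_passive deprels (is_passive deprels)

-- ===== LEMMAS AND PROOFS =====

-- Bool helper for pushing B's if-update through an or.
theorem pv_if_or (c s t : Bool) : ((if c = true then true else s) || t) = (s || (c || t)) := by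
  cases c <;> cases s <;> cases t <;> rfl

-- B's flag fold computes, from any start flags, "start ∨ some element's label equals the constant".
theorem is_passive_alt_fold_char (l : List (String × String)) (a b : Bool) :
    l.foldl
      (fun (st : Bool × Bool) drel =>
        let rel := drel.2
        ((if rel == "hd/su" then true else st.1), (if rel == "hd/obj1" then true else st.2)))
      (a, b)
    = (a || (l.map Prod.snd).contains "hd/su", b || (l.map Prod.snd).contains "hd/obj1") := by
  induction l generalizing a b with
  | nil => simp
  | cons x xs ih =>
    simp only [List.foldl_cons, List.map_cons, List.contains_cons, ih, Prod.mk.injEq]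
    constructor
    · rw [BEq.comm (a := "hd/su")]
      exact pv_if_or _ _ _
    · rw [BEq.comm (a := "hd/obj1")]
      exact pv_if_or _ _ _

theorem is_passive_spec_aux (deprels : List (String × String)) :
    is_passive deprels = is_passive_alt deprels := by
  unfold is_passive is_passive_alt
  rw [is_passive_alt_fold_char, PySem.List.foldl_append_singleton_eq_map]
  by_cases h1 : (deprels.map Prod.snd).contains "hd/su" = true <;>
    by_cases h2 : (deprels.map Prod.snd).contains "hd/obj1" = true <;>
      simp only [h1, h2] <;> simp_all

-- ===== VERDICT (by name: the statement is the Claim_ definition above) =====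
theorem is_passive_spec : Claim_equal_is_passive := by
  intro deprels _
  exact is_passive_spec_aux deprels
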